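-- pv_equiv track=rewrite | github.com/avishek376/Scaler-Problem-Solving | Intermediate/14 Intermediate DSA : Strings/Homework/Q4. Change character/Change character.py | solve
-- ===== SOURCE A (Python) =====
-- def solve(A, B):
--     n = len(A)
--     arr = [0] * 26
--     ans = 0
--     for i in A:
--         arr[ord(i) - 97] += 1
--         if arr[ord(i) - 97] == 1:
--             ans += 1
--     arr.sort()
--     for i in range(26):
--         if B - arr[i] >= 0 and arr[i] != 0:
--             ans -= 1
--             B -= arr[i]
--     ans = max(ans, 1)
--     return ans
-- ===== SOURCE B (Python) =====
-- def solve(A, B):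
--     freq = {}
--     for c in A:
--         freq[c] = freq.get(c, 0) + 1
--     hist = {}
--     for v in freq.values():
--         hist[v] = hist.get(v, 0) + 1
--     removed = 0
--     budget = B
--     for v in range(1, len(A) + 1):
--         m = hist.get(v, 0)
--         if m == 0:
--             continue
--         if budget < v:
--             break
--         t = min(m, budget // v)
--         removed += t
--         budget -= t * v
--     return max(len(freq) - removed, 1)
-- ===== Notes on version B (the rewrite author's own statement) =====
-- stated objective: alternative
-- what changed: Replaces A's sort of the 26-slot count array and per-group budget-mutating removal loop with a frequency-of-frequencies histogram and a sortless sweep over count values 1..len(A) that removes whole buckets in bulk with one integer division per value.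
-- outside the precondition, e.g. on solve('Ga', 0): A returns 1, B returns 2; on solve(' ', 0): A raises IndexError, B returns 1
import Mathlib
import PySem

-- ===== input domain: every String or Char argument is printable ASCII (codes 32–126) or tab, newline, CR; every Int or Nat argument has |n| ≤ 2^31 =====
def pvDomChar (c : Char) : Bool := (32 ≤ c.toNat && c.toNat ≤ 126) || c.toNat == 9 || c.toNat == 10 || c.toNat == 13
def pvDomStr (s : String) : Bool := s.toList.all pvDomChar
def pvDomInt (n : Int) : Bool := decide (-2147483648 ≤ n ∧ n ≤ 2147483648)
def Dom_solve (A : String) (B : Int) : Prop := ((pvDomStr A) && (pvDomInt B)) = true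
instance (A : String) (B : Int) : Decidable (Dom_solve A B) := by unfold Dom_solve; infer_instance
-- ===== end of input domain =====

-- B replaces A's sort-then-greedy removal over the 26-slot array with a
-- frequency-of-frequencies histogram and a sortless sweep over the count values
-- 1..len(A), removing whole buckets in bulk with one integer division per value
-- (objective: alternative).

-- ===== PORT A =====
-- body of A's first loop: arr[ord(i)-97] += 1; if arr[ord(i)-97] == 1: ans += 1
def pvStep1 (st : List Int × Int) (i : Char) : List Int × Int :=
  let arr := PySem.List.pySetD st.1 ((i.toNat : Int) - 97)
      (PySem.List.pyGetD st.1 ((i.toNat : Int) - 97) 0 + 1)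
  (arr, if PySem.List.pyGetD arr ((i.toNat : Int) - 97) 0 = 1 then st.2 + 1 else st.2)

def solve (A : String) (B : Int) : Int :=
  let _n : Int := (A.toList.length : Int)
  let st := A.toList.foldl pvStep1 (List.replicate 26 0, 0)
  let arr := PySem.List.sorted st.1 (fun x => x) false
  let st2 := (PySem.List.pyRange 0 26 1).foldl
      (fun (st : Int × Int) i =>
        if st.1 - PySem.List.pyGetD arr i 0 ≥ 0 ∧ PySem.List.pyGetD arr i 0 ≠ 0
        then (st.1 - PySem.List.pyGetD arr i 0, st.2 - 1) else st) (B, st.2)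
  max st2.2 1

-- ===== PORT B =====
-- B's value sweep: for v in range(1, len(A)+1): m = hist.get(v,0); skip / break / bulk-remove
def pvBLoop : List Int → PySem.Dict Int Int → Int → Int → Int
  | [], _, removed, _ => removed
  | v :: t, hist, removed, budget =>
      let m := hist.getD v 0
      if m = 0 then pvBLoop t hist removed budget
      else if budget < v then removed
      else
        let tt := min m (PySem.Int.floordiv budget v)
        pvBLoop t hist (removed + tt) (budget - tt * v)

def solve_alt (A : String) (B : Int) : Int :=
  let freq : PySem.Dict Char Int :=
    A.toList.foldl (fun d c => d.modify c 0 (fun x => x + 1)) PySem.Dict.empty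
  let hist : PySem.Dict Int Int :=
    freq.values.foldl (fun d v => d.modify v 0 (fun x => x + 1)) PySem.Dict.empty
  let removed := pvBLoop (PySem.List.pyRange 1 ((A.toList.length : Int) + 1) 1) hist 0 B
  max ((freq.size : Int) - removed) 1

-- ===== PRECONDITION & SPEC =====
-- Pre_ restricts to the problem's natural domain, strings of lowercase letters 'a'..'z':
-- outside it A either raises IndexError (codes < 71 or > 122) or, for codes 71..96,
-- returns a value produced by Python's negative-list-index wraparound, which aliases such
-- a character with the lowercase letter 26 codepoints higher.
def Pre_solve (A : String) (B : Int) : Prop :=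
  (A.toList.all (fun c => 97 ≤ c.toNat && c.toNat ≤ 122)) = true
instance (A : String) (B : Int) : Decidable (Pre_solve A B) := by
  unfold Pre_solve; infer_instance
def pvWitness_solve : String × Int := ("aab", 1)

def Spec_solve (A : String) (B : Int) (out : Int) : Prop := out = solve_alt A B
instance (A : String) (B : Int) (out : Int) : Decidable (Spec_solve A B out) := by
  unfold Spec_solve; infer_instance

-- ===== CLAIM (what is proved, stated in full; the proofs are below) =====
def Claim_equal_solve : Prop := ∀ (A : String) (B : Int),
  Dom_solve A B → Pre_solve A B → Spec_solve A B (solve A B)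

-- ===== LEMMAS AND PROOFS =====

-- the lowercase letter of slot j
def pvChar (j : Nat) : Char := Char.ofNat (97 + j)

-- greedy removal count: how many of the ascending groups fit the (shrinking) budget
def pvCp : List Int → Int → Int
  | [], _ => 0
  | v :: t, b => if v ≤ b then 1 + pvCp t (b - v) else 0

-- A's second-loop body as a function of the slot value
def pvStep2 (st : Int × Int) (v : Int) : Int × Int :=
  if st.1 - v ≥ 0 ∧ v ≠ 0 then (st.1 - v, st.2 - 1) else st

lemma pvChar_toNat {j : Nat} (h : j < 26) : (pvChar j).toNat = 97 + j := by
  have hv : (97 + j).isValidChar := by constructor; omega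
  simp [pvChar, Char.toNat_ofNat, hv]

lemma pvChar_of_lower {c : Char} (h1 : 97 ≤ c.toNat) (h2 : c.toNat ≤ 122) :
    pvChar (c.toNat - 97) = c := by
  have h : 97 + (c.toNat - 97) = c.toNat := by omega
  rw [pvChar, h, Char.ofNat_toNat]

lemma pvChar_inj {i j : Nat} (hi : i < 26) (hj : j < 26) (h : pvChar i = pvChar j) : i = j := by
  have := congrArg Char.toNat h
  rw [pvChar_toNat hi, pvChar_toNat hj] at this
  omega

lemma pv_dedup_append (l : List Char) (c : Char) :
    PySem.List.dedup (l ++ [c])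
      = if c ∈ l then PySem.List.dedup l else PySem.List.dedup l ++ [c] := by
  rw [PySem.List.dedup_eq_ofList, PySem.List.dedup_eq_ofList, PySem.Set.ofList_append]
  show PySem.Set.add (PySem.Set.ofList l) c = _
  rw [PySem.Set.add]
  by_cases hc : c ∈ l
  · rw [if_pos, if_pos hc]
    have := (PySem.Set.mem_ofList l c).mpr hc
    revert this
    simp [PySem.Set.contains]
  · rw [if_neg, if_neg hc]
    have : ¬ c ∈ PySem.Set.ofList l := fun hx => hc ((PySem.Set.mem_ofList l c).mp hx)
    revert this
    simp [PySem.Set.contains]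

-- first loop characterisation: slot counts and the running distinct counter
lemma pv_loop1 (l : List Char) (h : ∀ c ∈ l, 97 ≤ c.toNat ∧ c.toNat ≤ 122) :
    l.foldl pvStep1 (List.replicate 26 0, 0)
      = ((List.range 26).map (fun j => (l.count (pvChar j) : Int)),
         ((PySem.List.dedup l).length : Int)) := by
  induction l using List.reverseRecOn with
  | nil =>
      simp [PySem.List.dedup]
  | append_singleton l c ih =>
      have hl : ∀ x ∈ l, 97 ≤ x.toNat ∧ x.toNat ≤ 122 := fun x hx => h x (by simp [hx])
      obtain ⟨hc1, hc2⟩ := h c (by simp)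
      rw [List.foldl_append, List.foldl_cons, List.foldl_nil, ih hl]
      set jc : Nat := c.toNat - 97 with hjc
      have hjc26 : jc < 26 := by omega
      have hcc : pvChar jc = c := pvChar_of_lower hc1 hc2
      have hidx : ((c.toNat : Int) - 97) = (jc : Int) := by omega
      set M := (List.range 26).map (fun j => (l.count (pvChar j) : Int)) with hM
      have hMlen : M.length = 26 := by simp [hM]
      have hget : PySem.List.pyGetD M ((c.toNat : Int) - 97) 0 = (l.count c : Int) := by
        rw [hidx, PySem.List.pyGetD_natCast, List.getD_eq_getElem?_getD, List.getElem?_map]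
        simp [hjc26, hcc]
      have hset : PySem.List.pySetD M ((c.toNat : Int) - 97) ((l.count c : Int) + 1)
          = (List.range 26).map (fun j => ((l ++ [c]).count (pvChar j) : Int)) := by
        rw [hidx, PySem.List.pySetD_natCast]
        apply List.ext_getElem
        · simp [hMlen]
        · intro j hj1 hj2
          have hj26 : j < 26 := by simpa [hMlen] using hj1
          simp only [List.getElem_set, hM, List.getElem_map, List.getElem_range]
          rw [List.count_append]
          by_cases hje : jc = j
          · subst hje
            rw [if_pos rfl]
            have h1 : List.count (pvChar jc) [c] = 1 := by
              simp [hcc]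
            rw [h1, hcc]
            push_cast
            ring
          · rw [if_neg hje]
            have h0 : List.count (pvChar j) [c] = 0 := by
              rw [List.count_singleton']
              have : ¬ (c = pvChar j) := by
                intro he
                exact hje (pvChar_inj hjc26 hj26 (by rw [hcc, he]))
              simp [this]
            rw [h0]
            simp
      have harr : PySem.List.pyGetD
          ((List.range 26).map (fun j => ((l ++ [c]).count (pvChar j) : Int)))
          ((c.toNat : Int) - 97) 0 = (l.count c : Int) + 1 := by
        rw [hidx, PySem.List.pyGetD_natCast, List.getD_eq_getElem?_getD, List.getElem?_map]
        simp [hjc26, hcc, List.count_append]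
      show pvStep1 (M, ((PySem.List.dedup l).length : Int)) c = _
      simp only [pvStep1, hget, hset, harr]
      rw [pv_dedup_append]
      by_cases hcl : c ∈ l
      · have hcnt : 1 ≤ l.count c := List.count_pos_iff.mpr hcl
        rw [if_neg (by omega), if_pos hcl]
      · have hcnt : l.count c = 0 := List.count_eq_zero.mpr hcl
        rw [if_pos (by omega), if_neg hcl]
        simp

-- the lowercase slots that do occur in l, mapped to their characters, are set(l)
lemma pv_filter_perm (l : List Char) (h : ∀ c ∈ l, 97 ≤ c.toNat ∧ c.toNat ≤ 122) :
    (((List.range 26).filter (fun j => decide (pvChar j ∈ l))).map pvChar).Perm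
      (PySem.Set.ofList l) := by
  apply (List.perm_ext_iff_of_nodup ?_ (PySem.Set.nodup_ofList l)).mpr
  · intro c
    rw [PySem.Set.mem_ofList, List.mem_map]
    constructor
    · rintro ⟨j, hj, rfl⟩
      have := List.of_mem_filter hj
      simpa using this
    · intro hc
      obtain ⟨h1, h2⟩ := h c hc
      refine ⟨c.toNat - 97, ?_, pvChar_of_lower h1 h2⟩
      apply List.mem_filter.mpr
      constructor
      · simp; omega
      · simp [pvChar_of_lower h1 h2, hc]
  · apply List.Nodup.map_on
    · intro x hx y hy hxy
      have hx26 : x < 26 := by simpa using List.mem_of_mem_filter hx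
      have hy26 : y < 26 := by simpa using List.mem_of_mem_filter hy
      exact pvChar_inj hx26 hy26 hxy
    · exact List.Nodup.filter _ (List.nodup_range)

lemma pv_len_ofList_le (l : List Char) (h : ∀ c ∈ l, 97 ≤ c.toNat ∧ c.toNat ≤ 122) :
    (PySem.Set.ofList l).length ≤ 26 := by
  have := (pv_filter_perm l h).length_eq
  rw [List.length_map] at this
  rw [← this]
  calc ((List.range 26).filter _).length ≤ (List.range 26).length := List.length_filter_le _ _
    _ = 26 := List.length_range

-- the 26 slot counts are, as a multiset, the distinct-char counts padded with zeros
lemma pv_perm (l : List Char) (h : ∀ c ∈ l, 97 ≤ c.toNat ∧ c.toNat ≤ 122) :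
    ((List.range 26).map (fun j => (l.count (pvChar j) : Int))).Perm
      (((PySem.Set.ofList l).map (fun c => (l.count c : Int)))
        ++ List.replicate (26 - (PySem.Set.ofList l).length) 0) := by
  have hsplit : ((List.range 26).filter (fun j => decide (pvChar j ∈ l))
      ++ (List.range 26).filter (fun j => !(decide (pvChar j ∈ l)))).Perm (List.range 26) :=
    List.filter_append_perm _ _
  have h1 : ((List.range 26).map (fun j => (l.count (pvChar j) : Int))).Perm
      ((((List.range 26).filter (fun j => decide (pvChar j ∈ l)))
        ++ ((List.range 26).filter (fun j => !(decide (pvChar j ∈ l))))).map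
          (fun j => (l.count (pvChar j) : Int))) :=
    (hsplit.map _).symm
  rw [List.map_append] at h1
  apply h1.trans
  apply List.Perm.append
  · have := (pv_filter_perm l h).map (fun c => (l.count c : Int))
    rw [List.map_map] at this
    exact this
  · have hz : ((List.range 26).filter (fun j => !(decide (pvChar j ∈ l)))).map
        (fun j => (l.count (pvChar j) : Int))
        = List.replicate (26 - (PySem.Set.ofList l).length) 0 := by
      apply List.eq_replicate_iff.mpr
      constructor
      · rw [List.length_map]
        have hlen := (pv_filter_perm l h).length_eq
        rw [List.length_map] at hlen
        have hsum := hsplit.length_eq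
        rw [List.length_append, List.length_range] at hsum
        omega
      · intro b hb
        rw [List.mem_map] at hb
        obtain ⟨j, hj, rfl⟩ := hb
        have : ¬ (pvChar j ∈ l) := by simpa using List.of_mem_filter hj
        rw [List.count_eq_zero.mpr this]
        rfl
    rw [hz]

-- sorting zeros ++ positives keeps the zeros in front
lemma pv_sorted_split (z : Nat) (V : List Int) (hpos : ∀ v ∈ V, 1 ≤ v) :
    PySem.List.sorted (List.replicate z 0 ++ V) (fun x => x) false
      = List.replicate z 0 ++ PySem.List.sorted V (fun x => x) false := by
  apply PySem.List.sorted_id_eq_of_perm_of_pairwise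
  · exact (List.Perm.append_left _ (PySem.List.sorted_perm V _ false))
  · apply List.pairwise_append.mpr
    refine ⟨List.pairwise_replicate.mpr (by simp), ?_, ?_⟩
    · exact PySem.List.sorted_pairwise V (fun x => x)
    · intro x hx y hy
      have hx0 : x = 0 := List.eq_of_mem_replicate hx
      have : y ∈ V := (PySem.List.mem_sorted V _ false y).mp hy
      have := hpos y this
      omega

lemma pv_skip_zeros (z : Nat) (L : List Int) (st : Int × Int) :
    (List.replicate z 0 ++ L).foldl pvStep2 st = L.foldl pvStep2 st := by
  induction z generalizing st with
  | zero => simp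
  | succ n ih =>
      rw [List.replicate_succ, List.cons_append, List.foldl_cons, ih]
      congr 1
      simp [pvStep2]

lemma pv_skip_all (t : List Int) (b a : Int) (h : ∀ x ∈ t, 1 ≤ x ∧ b < x) :
    t.foldl pvStep2 (b, a) = (b, a) := by
  induction t with
  | nil => simp
  | cons v t ih =>
      have hv := h v (by simp)
      rw [List.foldl_cons]
      have hs : pvStep2 (b, a) v = (b, a) := by
        simp only [pvStep2]
        rw [if_neg]
        rintro ⟨h1, _⟩
        omega
      rw [hs, ih (fun x hx => h x (by simp [hx]))]

-- the greedy loop removes exactly the longest ascending prefix that fits the budget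
lemma pv_greedy (L : List Int) (hpos : ∀ x ∈ L, 1 ≤ x)
    (hs : L.Pairwise (fun x y => x ≤ y)) (b a : Int) :
    (L.foldl pvStep2 (b, a)).2 = a - pvCp L b := by
  induction L generalizing b a with
  | nil => simp [pvCp]
  | cons v t ih =>
      have hv : 1 ≤ v := hpos v (by simp)
      rw [List.foldl_cons]
      by_cases hb : v ≤ b
      · have hs1 : pvStep2 (b, a) v = (b - v, a - 1) := by
          simp only [pvStep2]
          rw [if_pos ⟨by omega, by omega⟩]
        rw [hs1, ih (fun x hx => hpos x (by simp [hx])) hs.of_cons]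
        simp only [pvCp]
        rw [if_pos hb]
        ring
      · have hs1 : pvStep2 (b, a) v = (b, a) := by
          simp only [pvStep2]
          rw [if_neg]
          rintro ⟨h1, _⟩
          omega
        rw [hs1, pv_skip_all t b a (fun x hx =>
          ⟨hpos x (by simp [hx]), by have := (List.pairwise_cons.mp hs).1 x hx; omega⟩)]
        simp only [pvCp]
        rw [if_neg hb]
        ring

-- pvCp is 0 when no element fits the budget
lemma pvCp_zero (S : List Int) (b : Int) (h : ∀ x ∈ S, ¬ x ≤ b) : pvCp S b = 0 := by
  cases S with
  | nil => rfl
  | cons v t =>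
      simp only [pvCp]
      rw [if_neg (h v (by simp))]

-- removing m whole copies of v when the budget covers them all
lemma pvCp_replicate_full (v : Int) (hv : 1 ≤ v) (T : List Int) :
    ∀ (m : Nat) (b : Int), (m : Int) * v ≤ b →
      pvCp (List.replicate m v ++ T) b = (m : Int) + pvCp T (b - (m : Int) * v) := by
  intro m
  induction m with
  | zero => intro b _; simp
  | succ k ih =>
      intro b hb
      have hvb : v ≤ b := by push_cast at hb; nlinarith
      have hkv : (k : Int) * v ≤ b - v := by push_cast at hb ⊢; nlinarith
      rw [List.replicate_succ, List.cons_append]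
      simp only [pvCp]
      rw [if_pos hvb, ih (b - v) hkv,
        show b - v - (k : Int) * v = b - ((k : Int) + 1) * v by ring]
      push_cast
      ring

-- removing only part of a bucket: the greedy count is the integer quotient
lemma pvCp_replicate_partial (v : Int) (hv : 1 ≤ v) (T : List Int)
    (hT : ∀ x ∈ T, v ≤ x) :
    ∀ (m : Nat) (b : Int), v ≤ b → b < (m : Int) * v →
      pvCp (List.replicate m v ++ T) b = PySem.Int.floordiv b v := by
  intro m
  induction m with
  | zero => intro b hb1 hb2; push_cast at hb2; omega
  | succ k ih =>
      intro b hb1 hb2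
      rw [List.replicate_succ, List.cons_append]
      simp only [pvCp]
      rw [if_pos hb1]
      by_cases h2 : v ≤ b - v
      · have hlt : b - v < (k : Int) * v := by push_cast at hb2 ⊢; nlinarith
        rw [ih (b - v) h2 hlt]
        set q := PySem.Int.floordiv (b - v) v with hq
        have hqc := (PySem.Int.floordiv_eq_iff_of_pos (by omega) : PySem.Int.floordiv (b - v) v = q ↔ _).mpr ?_ |>.symm
        · obtain ⟨hq1, hq2⟩ := (PySem.Int.floordiv_eq_iff_of_pos (a := b - v) (b := v) (q := q) (by omega)).mp hq.symm
          have : PySem.Int.floordiv b v = q + 1 := by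
            apply (PySem.Int.floordiv_eq_iff_of_pos (by omega)).mpr
            constructor
            · nlinarith
            · nlinarith
          rw [this]; ring
        · exact (PySem.Int.floordiv_eq_iff_of_pos (by omega)).mp hq.symm
      · have hz : pvCp (List.replicate k v ++ T) (b - v) = 0 := by
          apply pvCp_zero
          intro x hx
          rcases List.mem_append.mp hx with hx | hx
          · have := List.eq_of_mem_replicate hx; omega
          · have := hT x hx; omega
        rw [hz]
        have : PySem.Int.floordiv b v = 1 := by
          apply (PySem.Int.floordiv_eq_iff_of_pos (by omega)).mpr
          constructor
          · omega
          · nlinarith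
        rw [this]
        norm_num

-- once the budget is below every remaining occupied value, the sweep adds nothing
lemma pvBLoop_stop (t : List Int) (hist : PySem.Dict Int Int) (r b : Int)
    (h : ∀ v ∈ t, hist.getD v 0 = 0 ∨ b < v) :
    pvBLoop t hist r b = r := by
  induction t with
  | nil => rfl
  | cons v t ih =>
      simp only [pvBLoop]
      rcases h v (by simp) with h0 | h0
      · rw [if_pos h0]
        exact ih (fun x hx => h x (by simp [hx]))
      · by_cases hm : hist.getD v 0 = 0
        · rw [if_pos hm]; exact ih (fun x hx => h x (by simp [hx]))
        · rw [if_neg hm, if_pos h0]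

-- the bucket sweep computes the greedy removal count over the sorted multiset
lemma pv_bucket (L : List Int) :
    ∀ (V : List Int) (hist : PySem.Dict Int Int) (r b : Int),
      L.Pairwise (· < ·) →
      (∀ x ∈ V, x ∈ L) →
      (∀ x ∈ V, 1 ≤ x) →
      (∀ v ∈ L, hist.getD v 0 = (V.count v : Int)) →
      pvBLoop L hist r b = r + pvCp (PySem.List.sorted V (fun x => x) false) b := by
  induction L with
  | nil =>
      intro V hist r b _ hmem _ _
      have hV : V = [] := List.eq_nil_iff_forall_not_mem.mpr (fun x hx => by
        have := hmem x hx; simp at this)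
      subst hV
      simp [pvBLoop, PySem.List.sorted, pvCp]
  | cons v t ih =>
      intro V hist r b hL hmem hpos hhist
      have hv1 : 1 ≤ v ∨ V.count v = 0 := by
        by_cases hvV : v ∈ V
        · exact Or.inl (hpos v hvV)
        · exact Or.inr (List.count_eq_zero.mpr hvV)
      have htlt : ∀ x ∈ t, v < x := (List.pairwise_cons.mp hL).1
      set V' := V.filter (fun x => decide (x ≠ v)) with hV'
      have h2 : ∀ (W : List Int), W.filter (fun x => decide (x = v))
          = List.replicate (W.count v) v := by
        intro W
        induction W with
        | nil => simp
        | cons a w ihw =>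
            by_cases hav : a = v
            · subst hav
              simp [List.filter_cons, List.count_cons, ihw, List.replicate_succ]
            · simp [List.filter_cons, List.count_cons, hav, ihw, Ne.symm hav]
      have hne : V.filter (fun x => !decide (x = v)) = V' := by
        rw [hV']
        apply List.filter_congr
        intro x _
        simp
      have hVperm : V.Perm (List.replicate (V.count v) v ++ V') := by
        have h1 := List.filter_append_perm (fun x => decide (x = v)) V
        rw [h2 V, hne] at h1
        exact h1.symm
      have hV'mem : ∀ x ∈ V', x ∈ t := by
        intro x hx
        have hxV := List.mem_of_mem_filter hx
        have hxne : x ≠ v := by simpa using List.of_mem_filter hx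
        rcases List.mem_cons.mp (hmem x hxV) with h | h
        · exact absurd h hxne
        · exact h
      have hV'pos : ∀ x ∈ V', 1 ≤ x := fun x hx => hpos x (List.mem_of_mem_filter hx)
      have hV'count : ∀ w ∈ t, V'.count w = V.count w := by
        intro w hw
        have hwv : w ≠ v := by have := htlt w hw; omega
        rw [hV', List.count_filter]
        simp [hwv]
      have hT := PySem.List.sorted_pairwise V' (fun x => x)
      set T := PySem.List.sorted V' (fun x => x) false with hTdef
      have hTge : ∀ x ∈ T, v < x := by
        intro x hx
        have : x ∈ V' := (PySem.List.mem_sorted V' _ false x).mp hx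
        exact htlt x (hV'mem x this)
      have hsortedV : PySem.List.sorted V (fun x => x) false
          = List.replicate (V.count v) v ++ T := by
        apply PySem.List.sorted_id_eq_of_perm_of_pairwise
        · exact (hVperm.trans (List.Perm.append_left _
            (PySem.List.sorted_perm V' _ false).symm)).symm
        · apply List.pairwise_append.mpr
          refine ⟨List.pairwise_replicate.mpr (by simp), hT, ?_⟩
          intro x hx y hy
          have hx0 : x = v := List.eq_of_mem_replicate hx
          have := hTge y hy
          omega
      simp only [pvBLoop]
      rw [hhist v (by simp)]
      by_cases hm0 : V.count v = 0
      · rw [if_pos (by exact_mod_cast hm0)]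
        have hvnot : v ∉ V := List.count_eq_zero.mp hm0
        have hVeq : V' = V := by
          rw [hV']
          apply List.filter_eq_self.mpr
          intro x hx
          have : x ≠ v := fun he => hvnot (he ▸ hx)
          simpa using this
        exact ih V hist r b hL.of_cons
          (fun x hx => hV'mem x (by rw [hVeq]; exact hx))
          hpos (fun w hw => hhist w (by simp [hw]))
      · have hvV : v ∈ V := List.count_pos_iff.mp (Nat.pos_of_ne_zero hm0)
        have hv : 1 ≤ v := hpos v hvV
        rw [if_neg (by exact_mod_cast hm0)]
        set mN := V.count v with hmN
        by_cases hb : b < v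
        · rw [if_pos hb]
          have : pvCp (PySem.List.sorted V (fun x => x) false) b = 0 := by
            rw [hsortedV]
            apply pvCp_zero
            intro x hx
            rcases List.mem_append.mp hx with hx | hx
            · have := List.eq_of_mem_replicate hx; omega
            · have := hTge x hx; omega
          omega
        · rw [if_neg hb]
          push_neg at hb
          by_cases hfull : (mN : Int) * v ≤ b
          · have hmin : min ((mN : Nat) : Int) (PySem.Int.floordiv b v) = (mN : Int) := by
              apply min_eq_left
              rw [PySem.Int.le_floordiv_iff_mul_le (by omega)]
              exact hfull
            rw [hmin]
            rw [ih V' hist (r + (mN : Int)) (b - (mN : Int) * v) hL.of_cons hV'mem hV'pos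
              (fun w hw => by rw [hhist w (by simp [hw]), hV'count w hw])]
            rw [hsortedV, pvCp_replicate_full v hv T mN b hfull]
            ring
          · push_neg at hfull
            have hq : PySem.Int.floordiv b v < (mN : Int) := by
              rw [PySem.Int.floordiv_lt_iff_lt_mul (by omega)]
              nlinarith
            have hmin : min ((mN : Nat) : Int) (PySem.Int.floordiv b v)
                = PySem.Int.floordiv b v := by
              apply min_eq_right
              omega
            rw [hmin]
            set q := PySem.Int.floordiv b v with hqdef
            obtain ⟨hq1, hq2⟩ :=
              (PySem.Int.floordiv_eq_iff_of_pos (a := b) (b := v) (q := q) (by omega)).mp rfl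
            have hstop : pvBLoop t hist (r + q) (b - q * v) = r + q := by
              apply pvBLoop_stop
              intro w hw
              right
              have := htlt w hw
              nlinarith
            rw [hstop, hsortedV,
              pvCp_replicate_partial v hv T (fun x hx => le_of_lt (hTge x hx)) mN b hb
                (by exact_mod_cast hfull)]

lemma pv_values (l : List Char) :
    (PySem.Dict.counter l).values = (PySem.Set.ofList l).map (fun c => (l.count c : Int)) := by
  rw [PySem.Dict.values, PySem.Dict.items_counter, List.map_map]
  rfl

-- the pyRange-indexed second loop is a fold of pvStep2 over the sorted array
lemma pv_loop2 (arr : List Int) (init : Int × Int) (harr : arr.length = 26) :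
    (PySem.List.pyRange 0 26 1).foldl
      (fun (st : Int × Int) i =>
        if st.1 - PySem.List.pyGetD arr i 0 ≥ 0 ∧ PySem.List.pyGetD arr i 0 ≠ 0
        then (st.1 - PySem.List.pyGetD arr i 0, st.2 - 1) else st) init
      = arr.foldl pvStep2 init := by
  have h26 : (26 : Int) = PySem.List.len arr := by
    rw [PySem.List.len_eq, harr]
    rfl
  rw [show (PySem.List.pyRange 0 26 1) = PySem.List.pyRange 0 (PySem.List.len arr) 1 from by
    rw [← h26]]
  exact PySem.List.foldl_pyRange_zero_pyGetD arr 0 pvStep2 init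

-- ===== VERDICT (by name: the statement is the Claim_ definition above) =====
theorem solve_spec : Claim_equal_solve := by
  intro A B _ hpre
  show solve A B = solve_alt A B
  have h : ∀ c ∈ A.toList, 97 ≤ c.toNat ∧ c.toNat ≤ 122 := by
    intro c hc
    have := List.all_eq_true.mp hpre c hc
    simpa using this
  set l := A.toList with hldef
  set V : List Int := (PySem.Set.ofList l).map (fun c => (l.count c : Int)) with hV
  set z : Nat := 26 - (PySem.Set.ofList l).length with hz
  have hVpos : ∀ v ∈ V, 1 ≤ v := by
    intro v hv
    rw [hV, List.mem_map] at hv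
    obtain ⟨c, hc, rfl⟩ := hv
    have : c ∈ l := (PySem.Set.mem_ofList l c).mp hc
    have := List.count_pos_iff.mpr this
    omega
  set S := PySem.List.sorted V (fun x => x) false with hS
  have hVlen : V.length = (PySem.Set.ofList l).length := by rw [hV, List.length_map]
  have hDlen : (PySem.List.dedup l).length = (PySem.Set.ofList l).length := by
    rw [PySem.List.dedup_eq_ofList]
  have hSpos : ∀ v ∈ S, 1 ≤ v := fun v hv =>
    hVpos v ((PySem.List.mem_sorted V _ false v).mp hv)
  -- A side
  have hA : solve A B
      = max (((PySem.List.dedup l).length : Int) - pvCp S B) 1 := by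
    simp only [solve, ← hldef]
    rw [pv_loop1 l h]
    have hsorted : PySem.List.sorted
        ((List.range 26).map (fun j => (l.count (pvChar j) : Int))) (fun x => x) false
        = List.replicate z 0 ++ S := by
      rw [PySem.List.sorted_eq_sorted_of_perm _ (List.replicate z 0 ++ V) (fun x => x)
        (fun a b hab => hab)
        ((pv_perm l h).trans List.perm_append_comm)]
      rw [pv_sorted_split z V hVpos, hS]
    rw [hsorted]
    have hlen : (List.replicate z 0 ++ S).length = 26 := by
      rw [List.length_append, List.length_replicate, hS, PySem.List.length_sorted, hVlen]
      have := pv_len_ofList_le l h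
      omega
    rw [pv_loop2 _ _ hlen, pv_skip_zeros,
      pv_greedy S hSpos (PySem.List.sorted_pairwise V (fun x => x)) B _]
  -- B side
  have hB : solve_alt A B
      = max (((PySem.Set.ofList l).length : Int) - pvCp S B) 1 := by
    simp only [solve_alt, ← hldef]
    rw [← PySem.Dict.counter_eq_foldl, ← PySem.Dict.counter_eq_foldl, pv_values, ← hV]
    have hsize : ((PySem.Dict.counter l).size : Int)
        = ((PySem.Set.ofList l).length : Int) := by
      rw [PySem.Dict.size, PySem.Dict.items_counter, List.length_map]
    rw [hsize]
    have hbucket : pvBLoop (PySem.List.pyRange 1 ((l.length : Int) + 1) 1)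
        (PySem.Dict.counter V) 0 B = 0 + pvCp S B := by
      rw [hS]
      apply pv_bucket
      · exact PySem.List.pairwise_lt_pyRange_one 1 _
      · intro x hx
        have hx1 := hVpos x hx
        have hxn : x ≤ (l.length : Int) := by
          rw [hV, List.mem_map] at hx
          obtain ⟨c, _, rfl⟩ := hx
          exact_mod_cast List.count_le_length
        rw [PySem.List.mem_pyRange_one]
        omega
      · exact hVpos
      · intro v _
        exact PySem.Dict.getD_counter V v
    rw [hbucket]
    ring_nf
  rw [hA, hB, hDlen]
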